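-- pv_equiv track=rewrite | github.com/sriramreddy-7/Summer-Training-SRU | DAY_15/rec building.py | count
-- ===== SOURCE A (Python) =====
-- def count(li, left, right, a, b, sr, ss):
--     if left > right:
--         return sr, ss
--     if a < li[left]:
--         sr += 1
--         a = li[left]
--
--     if b < li[right]:
--         ss += 1
--         b = li[right]
--
--     return count(li, left + 1, right - 1, a, b, sr, ss)
-- ===== SOURCE B (Python) =====
-- def count(li, left, right, a, b, sr, ss):
--     steps = (right - left) // 2 + 1
--     for k in range(steps):
--         i = left + k
--         j = right - k
--         if a < li[i]:
--             sr += 1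
--             a = li[i]
--         if b < li[j]:
--             ss += 1
--             b = li[j]
--     return sr, ss
-- ===== Notes on version B (the rewrite author's own statement) =====
-- stated objective: idiomatic
-- what changed: Replaces the two-ended recursion by a single counted for-loop: the number of meeting steps is computed up front as (right-left)//2+1 and each iteration inspects li[left+k] and li[right-k], returning (sr, ss) after the loop.
import Mathlib
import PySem

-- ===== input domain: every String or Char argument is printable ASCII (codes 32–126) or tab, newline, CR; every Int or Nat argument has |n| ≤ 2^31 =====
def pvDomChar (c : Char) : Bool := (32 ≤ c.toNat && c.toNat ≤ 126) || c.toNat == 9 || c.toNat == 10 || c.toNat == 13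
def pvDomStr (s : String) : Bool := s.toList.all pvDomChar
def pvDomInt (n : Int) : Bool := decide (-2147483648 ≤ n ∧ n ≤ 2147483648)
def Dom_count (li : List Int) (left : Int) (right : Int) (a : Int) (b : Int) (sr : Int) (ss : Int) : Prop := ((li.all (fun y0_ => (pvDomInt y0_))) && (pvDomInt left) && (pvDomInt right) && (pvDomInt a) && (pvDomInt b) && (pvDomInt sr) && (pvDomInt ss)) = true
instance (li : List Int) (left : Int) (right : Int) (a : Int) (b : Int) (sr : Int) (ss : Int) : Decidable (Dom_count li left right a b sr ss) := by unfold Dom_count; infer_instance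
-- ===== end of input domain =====

-- B replaces A's two-ended recursion by a counted for-loop over (right-left)//2+1 meeting
-- steps (idiomatic, same cost); return values agree on every input where A returns.

-- ===== PORT A =====
-- literal port of A's recursion; the pyGet? default 0 is never used inside Pre_count
def count (li : List Int) (left : Int) (right : Int) (a : Int) (b : Int) (sr : Int) (ss : Int) : Int × Int :=
  if left > right then (sr, ss)
  else
    let x := (PySem.List.pyGet? li left).getD 0
    let sr1 := if a < x then sr + 1 else sr
    let a1 := if a < x then x else a
    let y := (PySem.List.pyGet? li right).getD 0
    let ss1 := if b < y then ss + 1 else ss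
    let b1 := if b < y then y else b
    count li (left + 1) (right - 1) a1 b1 sr1 ss1
termination_by (right - left + 1).toNat
decreasing_by omega

-- ===== PORT B =====
-- loop body of Source B's for-loop: state (a, b, sr, ss), iteration index k
def countStep (li : List Int) (left : Int) (right : Int) (st : Int × Int × Int × Int) (k : Int) : Int × Int × Int × Int :=
  let x := (PySem.List.pyGet? li (left + k)).getD 0
  let sr1 := if st.1 < x then st.2.2.1 + 1 else st.2.2.1
  let a1 := if st.1 < x then x else st.1
  let y := (PySem.List.pyGet? li (right - k)).getD 0
  let ss1 := if st.2.1 < y then st.2.2.2 + 1 else st.2.2.2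
  let b1 := if st.2.1 < y then y else st.2.1
  (a1, b1, sr1, ss1)

def count_alt (li : List Int) (left : Int) (right : Int) (a : Int) (b : Int) (sr : Int) (ss : Int) : Int × Int :=
  let steps := PySem.Int.floordiv (right - left) 2 + 1
  let st := (PySem.List.pyRange 0 steps 1).foldl (countStep li left right) (a, b, sr, ss)
  (st.2.2.1, st.2.2.2)

-- ===== PRECONDITION & SPEC =====
-- Pre_count excludes exactly the inputs on which A raises IndexError: the loop runs
-- (left ≤ right) and the first probed index left or right is outside Python's valid
-- range [-len, len).
def Pre_count (li : List Int) (left : Int) (right : Int) (a : Int) (b : Int) (sr : Int) (ss : Int) : Prop :=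
  left > right ∨ (-(li.length : Int) ≤ left ∧ right < (li.length : Int))
instance (li : List Int) (left : Int) (right : Int) (a : Int) (b : Int) (sr : Int) (ss : Int) : Decidable (Pre_count li left right a b sr ss) := by unfold Pre_count; infer_instance
def pvWitness_count : List Int × Int × Int × Int × Int × Int × Int := ([1, 3, 2, 5, 4], 0, 4, 0, 0, 0, 0)
def Spec_count (li : List Int) (left : Int) (right : Int) (a : Int) (b : Int) (sr : Int) (ss : Int) (out : Int × Int) : Prop := out = count_alt li left right a b sr ss
instance (li : List Int) (left : Int) (right : Int) (a : Int) (b : Int) (sr : Int) (ss : Int) (out : Int × Int) : Decidable (Spec_count li left right a b sr ss out) := by unfold Spec_count; infer_instance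

-- ===== CLAIM (what is proved, stated in full; the proofs are below) =====
def Claim_equal_count : Prop := ∀ (li : List Int) (left : Int) (right : Int) (a : Int) (b : Int) (sr : Int) (ss : Int), Dom_count li left right a b sr ss → Pre_count li left right a b sr ss → Spec_count li left right a b sr ss (count li left right a b sr ss)

-- ===== LEMMAS AND PROOFS =====

theorem countStep_shift (li : List Int) (left : Int) (right : Int) (st : Int × Int × Int × Int) (k : Int) :
    countStep li left right st (1 + k) = countStep li (left + 1) (right - 1) st k := by
  simp only [countStep]
  have h1 : left + (1 + k) = left + 1 + k := by ring
  have h2 : right - (1 + k) = right - 1 - k := by ring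
  rw [h1, h2]

theorem foldl_countStep_shift (li : List Int) (left : Int) (right : Int) (s : Int) (st : Int × Int × Int × Int) :
    (PySem.List.pyRange 1 s 1).foldl (countStep li left right) st
      = (PySem.List.pyRange 0 (s - 1) 1).foldl (countStep li (left + 1) (right - 1)) st := by
  rw [PySem.List.pyRange_one, PySem.List.pyRange_one]
  have hn : (s - 1 - 0).toNat = (s - 1).toNat := by omega
  rw [hn]
  rw [List.foldl_map, List.foldl_map]
  induction (List.range (s - 1).toNat) generalizing st with
  | nil => rfl
  | cons x xs ih =>
      simp only [List.foldl_cons]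
      rw [countStep_shift]
      have : (0 : Int) + (x : Int) = (x : Int) := by ring
      rw [this, ih]

theorem count_eq_alt_aux (n : Nat) : ∀ (li : List Int) (left right a b sr ss : Int),
    (right - left + 1).toNat ≤ n → count li left right a b sr ss = count_alt li left right a b sr ss := by
  induction n with
  | zero =>
      intro li left right a b sr ss h
      have hgt : left > right := by omega
      rw [count]
      simp only [hgt, if_pos]
      have hs : PySem.Int.floordiv (right - left) 2 + 1 ≤ 0 := by
        show Int.fdiv (right - left) 2 + 1 ≤ 0
        rw [Int.fdiv_eq_ediv]; omega
      simp only [count_alt]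
      rw [PySem.List.pyRange_one_eq_nil hs]
      rfl
  | succ n ih =>
      intro li left right a b sr ss h
      by_cases hgt : left > right
      · rw [count]
        simp only [hgt, if_pos]
        have hs : PySem.Int.floordiv (right - left) 2 + 1 ≤ 0 := by
          show Int.fdiv (right - left) 2 + 1 ≤ 0
          rw [Int.fdiv_eq_ediv]; omega
        simp only [count_alt]
        rw [PySem.List.pyRange_one_eq_nil hs]
        rfl
      · have hle : left ≤ right := by omega
        have hspos : (0 : Int) < PySem.Int.floordiv (right - left) 2 + 1 := by
          show (0 : Int) < Int.fdiv (right - left) 2 + 1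
          rw [Int.fdiv_eq_ediv]; omega
        have hssub : PySem.Int.floordiv (right - left) 2 + 1 - 1
            = PySem.Int.floordiv (right - 1 - (left + 1)) 2 + 1 := by
          show Int.fdiv (right - left) 2 + 1 - 1 = Int.fdiv (right - 1 - (left + 1)) 2 + 1
          rw [Int.fdiv_eq_ediv, Int.fdiv_eq_ediv]; omega
        rw [count]
        simp only [hgt, if_false]
        rw [ih li (left + 1) (right - 1) _ _ _ _ (by omega)]
        simp only [count_alt]
        rw [PySem.List.pyRange_one_cons hspos, List.foldl_cons]
        simp only [zero_add]
        rw [foldl_countStep_shift, hssub]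
        simp only [countStep, add_zero, sub_zero]

theorem count_eq_alt (li : List Int) (left : Int) (right : Int) (a : Int) (b : Int) (sr : Int) (ss : Int) :
    count li left right a b sr ss = count_alt li left right a b sr ss :=
  count_eq_alt_aux (right - left + 1).toNat li left right a b sr ss le_rfl

-- ===== VERDICT (by name: the statement is the Claim_ definition above) =====
theorem count_spec : Claim_equal_count := by
  intro li left right a b sr ss _ _
  exact count_eq_alt li left right a b sr ss
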